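-- pv_equiv track=rewrite | github.com/2112529/CacheTransformer | Glider-R/LSTM.py | generate_opt_labels
-- ===== SOURCE A (Python) =====
-- def generate_opt_labels(memory_access_trace):
--     """
--     Generate labels for memory access trace using the OPT (Belady's) algorithm.
--     Label 1 indicates 'cache-friendly' and 0 indicates 'cache-averse'.
--     """
--     labels = [0] * len(memory_access_trace)
--     access_indices = {val: [] for val in set(memory_access_trace)}
--
--     # Create a list of indices for each memory access
--     for idx, access in enumerate(memory_access_trace):
--         access_indices[access].append(idx)
--
--     # Iterate through the memory access trace
--     for idx, access in enumerate(memory_access_trace):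
--         future_accesses = access_indices[access]
--
--         # Remove the current access from future_accesses
--         future_accesses.pop(0)
--
--         # If the current access will be accessed again in the future, label it as 'cache-friendly'
--         if future_accesses:
--             labels[idx] = 1
--
--     return labels
-- ===== SOURCE B (Python) =====
-- def generate_opt_labels(memory_access_trace):
--     """One backward pass: an access is cache-friendly iff its value was already
--     seen when scanning from the end, i.e. it recurs later in the trace."""
--     seen = set()
--     labels = []
--     for access in reversed(memory_access_trace):
--         labels.append(1 if access in seen else 0)
--         seen.add(access)
--     labels.reverse()
--     return labels
-- ===== Notes on version B (the rewrite author's own statement) =====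
-- stated objective: faster
-- what changed: Replaces the per-value index-list dictionary and the forward pass that pops the head of each index list (pop(0) is O(k)) with a single backward scan over the trace keeping a set of values already seen: label 1 iff the value recurs later.
import Mathlib
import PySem

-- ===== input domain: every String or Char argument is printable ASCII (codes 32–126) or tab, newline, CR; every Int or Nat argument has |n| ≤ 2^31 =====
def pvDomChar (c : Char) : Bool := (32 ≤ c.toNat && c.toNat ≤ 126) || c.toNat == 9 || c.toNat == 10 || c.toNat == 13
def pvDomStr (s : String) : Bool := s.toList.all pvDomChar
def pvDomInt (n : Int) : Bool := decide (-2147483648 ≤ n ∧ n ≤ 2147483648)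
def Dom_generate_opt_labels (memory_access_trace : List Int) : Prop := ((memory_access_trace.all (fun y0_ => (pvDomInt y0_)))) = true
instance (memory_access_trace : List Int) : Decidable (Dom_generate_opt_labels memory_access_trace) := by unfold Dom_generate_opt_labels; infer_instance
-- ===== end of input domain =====

-- B replaces A's per-value index-list dictionary + forward pass with pop(0) by one
-- backward scan keeping a set of already-seen values (faster: O(n) vs O(n^2) worst case).

-- ===== PORT A =====
-- second loop body: fa = access_indices[access]; fa.pop(0); labels[idx] = 1 if fa
-- (pop(0) can only be reached with a nonempty list — idx itself is in it — so `tail` is exact there)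
def pvAStep (st : List Int × PySem.Dict Int (List Int)) (p : Int × Int) :
    List Int × PySem.Dict Int (List Int) :=
  let fa := st.2.getD p.2 []
  let fa' := fa.tail
  (if fa' ≠ [] then PySem.List.pySetD st.1 p.1 1 else st.1, st.2.insert p.2 fa')

def generate_opt_labels (memory_access_trace : List Int) : List Int :=
  let labels : List Int := List.replicate memory_access_trace.length 0
  -- {val: [] for val in set(trace)}  (dict only ever looked up, so set order is immaterial)
  let d0 : PySem.Dict Int (List Int) :=
    (PySem.Set.ofList memory_access_trace).foldl (fun d v => d.insert v []) PySem.Dict.empty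
  -- for idx, access in enumerate(trace): access_indices[access].append(idx)
  let d1 := (PySem.List.enumerate memory_access_trace).foldl
    (fun d p => d.modify p.2 [] (· ++ [p.1])) d0
  ((PySem.List.enumerate memory_access_trace).foldl pvAStep (labels, d1)).1

-- ===== PORT B =====
def pvBStep (st : PySem.Set Int × List Int) (access : Int) : PySem.Set Int × List Int :=
  (PySem.Set.add st.1 access, st.2 ++ [if PySem.Set.contains st.1 access then (1 : Int) else 0])

def generate_opt_labels_alt (memory_access_trace : List Int) : List Int :=
  (memory_access_trace.reverse.foldl pvBStep (PySem.Set.empty, [])).2.reverse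

-- ===== PRECONDITION & SPEC =====
def Spec_generate_opt_labels (memory_access_trace : List Int) (out : List Int) : Prop := out = generate_opt_labels_alt memory_access_trace
instance (memory_access_trace : List Int) (out : List Int) : Decidable (Spec_generate_opt_labels memory_access_trace out) := by unfold Spec_generate_opt_labels; infer_instance

-- ===== CLAIM (what is proved, stated in full; the proofs are below) =====
def Claim_equal_generate_opt_labels : Prop := ∀ (memory_access_trace : List Int), Dom_generate_opt_labels memory_access_trace → Spec_generate_opt_labels memory_access_trace (generate_opt_labels memory_access_trace)

-- ===== LEMMAS AND PROOFS =====

/-- Reference labels: 1 iff the value occurs again later in the trace. -/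
def pvSpecLabels : List Int → List Int
  | [] => []
  | x :: xs => (if x ∈ xs then (1 : Int) else 0) :: pvSpecLabels xs

/-- indices (from s) of the occurrences of v in rest -/
def pvOcc (rest : List Int) (s : Int) (v : Int) : List Int :=
  ((PySem.List.enumerate rest s).filter (fun p => p.2 == v)).map (·.1)

theorem pvOcc_cons (x : Int) (rest : List Int) (s v : Int) :
    pvOcc (x :: rest) s v = if x = v then s :: pvOcc rest (s + 1) v else pvOcc rest (s + 1) v := by
  simp only [pvOcc, PySem.List.enumerate_cons, List.filter_cons]
  by_cases h : x = v
  · simp [h]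
  · simp [h]

theorem pvOcc_ne_nil_iff (rest : List Int) (s v : Int) : pvOcc rest s v ≠ [] ↔ v ∈ rest := by
  induction rest generalizing s with
  | nil => simp [pvOcc]
  | cons x xs ih =>
    rw [pvOcc_cons]
    by_cases h : x = v
    · subst h; simp
    · rw [if_neg h, List.mem_cons, ih]
      constructor
      · exact Or.inr
      · rintro (hv | hv)
        · exact absurd hv.symm h
        · exact hv

-- B equals the reference labels
theorem pvB_fst (l : List Int) (s : PySem.Set Int) (acc : List Int) :
    (l.foldl pvBStep (s, acc)).1 = PySem.Set.update s l := by
  induction l generalizing s acc with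
  | nil => simp [PySem.Set.update_nil]
  | cons x xs ih => simp [List.foldl, pvBStep, ih, PySem.Set.update_cons]

theorem pvB_eq_spec (t : List Int) : generate_opt_labels_alt t = pvSpecLabels t := by
  induction t with
  | nil => rfl
  | cons x xs ih =>
    unfold generate_opt_labels_alt at *
    rw [List.reverse_cons, List.foldl_append]
    simp only [List.foldl_cons, List.foldl_nil, pvBStep]
    rw [pvB_fst]
    have hmem : PySem.Set.contains (PySem.Set.update PySem.Set.empty xs.reverse) x
        = decide (x ∈ xs) := by
      rw [PySem.Set.update_empty]
      by_cases h : x ∈ xs <;> simp [h]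
    rw [hmem]
    rw [List.reverse_append]
    simp only [List.reverse_cons, List.reverse_nil, List.nil_append, List.singleton_append]
    rw [ih]
    by_cases h : x ∈ xs <;> simp [pvSpecLabels, h]

-- A's initial dictionaries
theorem pvD0_getD (l : List Int) (d : PySem.Dict Int (List Int))
    (h : ∀ v, d.getD v [] = []) (v : Int) :
    (l.foldl (fun d u => d.insert u ([] : List Int)) d).getD v [] = [] := by
  induction l generalizing d with
  | nil => exact h v
  | cons x xs ih =>
    simp only [List.foldl_cons]
    exact ih _ (fun w => by rw [PySem.Dict.getD_insert]; split <;> simp [h])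

theorem pvD1_getD (l : List (Int × Int)) (d : PySem.Dict Int (List Int)) (v : Int) :
    (l.foldl (fun d p => d.modify p.2 [] (· ++ [p.1])) d).getD v []
      = d.getD v [] ++ (l.filter (fun p => p.2 == v)).map (·.1) := by
  induction l generalizing d with
  | nil => simp
  | cons x xs ih =>
    simp only [List.foldl_cons, List.filter_cons]
    rw [ih, PySem.Dict.getD_modify]
    by_cases h : v = x.2
    · simp [h]
    · have hb : (x.2 == v) = false := by
        rw [beq_eq_false_iff_ne]; exact Ne.symm h
      simp [h, hb]

-- A's main loop
theorem pvA_loop (rest : List Int) (pre : List Int) (d : PySem.Dict Int (List Int))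
    (hd : ∀ v, d.getD v [] = pvOcc rest (pre.length : Int) v) :
    ((PySem.List.enumerate rest (pre.length : Int)).foldl pvAStep
        (pre ++ List.replicate rest.length 0, d)).1 = pre ++ pvSpecLabels rest := by
  induction rest generalizing pre d with
  | nil => simp [PySem.List.enumerate, pvSpecLabels]
  | cons x xs ih =>
    rw [PySem.List.enumerate_cons, List.foldl_cons]
    have hfa : d.getD x [] = (pre.length : Int) :: pvOcc xs ((pre.length : Int) + 1) x := by
      rw [hd x, pvOcc_cons]; simp
    have hstep : pvAStep (pre ++ List.replicate (x :: xs).length 0, d) ((pre.length : Int), x)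
        = ((pre ++ [if x ∈ xs then (1 : Int) else 0]) ++ List.replicate xs.length 0,
           d.insert x (pvOcc xs ((pre.length : Int) + 1) x)) := by
      simp only [pvAStep, hfa, List.tail_cons]
      congr 1
      by_cases h : x ∈ xs
      · have hne : pvOcc xs ((pre.length : Int) + 1) x ≠ [] := (pvOcc_ne_nil_iff _ _ _).2 h
        simp only [if_pos hne, if_pos h]
        rw [show (List.replicate (x :: xs).length (0 : Int))
              = (0 : Int) :: List.replicate xs.length 0 from rfl]
        rw [PySem.List.pySetD_natCast]
        rw [List.set_append_right _ _ (by omega)]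
        simp
      · have hnn : ¬ pvOcc xs ((pre.length : Int) + 1) x ≠ [] := by
          simp [pvOcc_ne_nil_iff, h]
        simp only [if_neg hnn, if_neg h]
        rw [show (List.replicate (x :: xs).length (0 : Int))
              = (0 : Int) :: List.replicate xs.length 0 from rfl]
        simp
    rw [hstep]
    have hlen : ((pre ++ [if x ∈ xs then (1 : Int) else 0]).length : Int)
        = (pre.length : Int) + 1 := by simp
    have := ih (pre ++ [if x ∈ xs then (1 : Int) else 0])
      (d.insert x (pvOcc xs ((pre.length : Int) + 1) x))
      (fun v => by
        rw [PySem.Dict.getD_insert, hlen]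
        by_cases hv : v = x
        · simp [hv]
        · rw [if_neg hv, hd v, pvOcc_cons, if_neg (fun h => hv h.symm)])
    rw [hlen] at this
    rw [this, List.append_assoc]
    simp [pvSpecLabels]

theorem pvA_eq_spec (t : List Int) : generate_opt_labels t = pvSpecLabels t := by
  unfold generate_opt_labels
  have hd1 : ∀ v, ((PySem.List.enumerate t).foldl
      (fun d p => d.modify p.2 [] (· ++ [p.1]))
      ((PySem.Set.ofList t).foldl (fun d v => d.insert v []) PySem.Dict.empty)).getD v []
        = pvOcc t 0 v := by
    intro v
    rw [pvD1_getD, pvD0_getD _ _ (fun w => by simp)]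
    rfl
  have := pvA_loop t [] _ (fun v => by simpa using hd1 v)
  simpa using this

-- ===== VERDICT (by name: the statement is the Claim_ definition above) =====
theorem generate_opt_labels_spec : Claim_equal_generate_opt_labels := by
  intro t _
  unfold Spec_generate_opt_labels
  rw [pvA_eq_spec, pvB_eq_spec]
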